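-- pv_equiv track=rewrite | github.com/marcelsetz/BDC | Assignment2/assignment2.py | calculate_quals
-- ===== SOURCE A (Python) =====
-- def calculate_quals(quality):
--     """ Calculates quality scores """
--     results = []
--     for qual in quality:
--         for item, checker in enumerate(qual):
--             try:
--                 results[item] += ord(checker) - 33
--             except IndexError:
--                 results.append(ord(checker) - 33)
--     return results
-- ===== SOURCE B (Python) =====
-- def calculate_quals(quality):
--     """ Calculates quality scores """
--     width = max(map(len, quality), default=0)
--     return [sum(ord(q[i]) - 33 for q in quality if i < len(q))
--             for i in range(width)]
-- ===== Notes on version B (the rewrite author's own statement) =====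
-- stated objective: idiomatic
-- what changed: Column-major recomputation: B computes the output width up front and sums each column directly with a comprehension, instead of A's read-major loop that grows the result list lazily by catching IndexError.
import Mathlib
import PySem

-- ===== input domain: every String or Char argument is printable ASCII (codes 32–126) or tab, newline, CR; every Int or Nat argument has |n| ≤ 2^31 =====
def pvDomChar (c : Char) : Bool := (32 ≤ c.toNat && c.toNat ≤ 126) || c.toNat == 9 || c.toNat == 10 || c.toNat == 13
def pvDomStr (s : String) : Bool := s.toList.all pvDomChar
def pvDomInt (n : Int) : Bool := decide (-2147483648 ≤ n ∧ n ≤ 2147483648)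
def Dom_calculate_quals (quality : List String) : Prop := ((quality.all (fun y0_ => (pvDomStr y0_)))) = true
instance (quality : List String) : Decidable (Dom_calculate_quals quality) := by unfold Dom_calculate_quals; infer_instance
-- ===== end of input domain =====

-- B replaces A's read-major loop (which grows `results` lazily by catching IndexError)
-- with a column-major form: compute the width, then sum each column directly (idiomatic; not faster).

-- ===== PORT A =====
-- inner 'for item, checker in enumerate(qual)' loop; the try/except is modelled by
-- the index test (results[item] raises IndexError exactly when item ≥ len(results),
-- and item is never negative here).
def pvInnerA (results : List Int) (item : Nat) (cs : List Char) : List Int :=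
  match cs with
  | [] => results
  | c :: cs' =>
    if item < results.length then
      pvInnerA (results.set item (results.getD item 0 + ((c.toNat : Int) - 33))) (item + 1) cs'
    else
      pvInnerA (results ++ [(c.toNat : Int) - 33]) (item + 1) cs'

def calculate_quals (quality : List String) : List Int :=
  quality.foldl (fun results qual => pvInnerA results 0 qual.toList) []

-- ===== PORT B =====
def calculate_quals_alt (quality : List String) : List Int :=
  let width := quality.foldl (fun m q => max m q.toList.length) 0
  (List.range width).map (fun i =>
    quality.foldl (fun s q =>
      if i < q.toList.length then s + ((q.toList.getD i ' ').toNat : Int) - 33 else s) 0)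

-- ===== PRECONDITION & SPEC =====
def Spec_calculate_quals (quality : List String) (out : List Int) : Prop := out = calculate_quals_alt quality
instance (quality : List String) (out : List Int) : Decidable (Spec_calculate_quals quality out) := by unfold Spec_calculate_quals; infer_instance

-- ===== CLAIM (what is proved, stated in full; the proofs are below) =====
def Claim_equal_calculate_quals : Prop := ∀ (quality : List String), Dom_calculate_quals quality → Spec_calculate_quals quality (calculate_quals quality)

-- ===== LEMMAS AND PROOFS =====

-- Elementwise addition of one row into the accumulator (what pvInnerA does from index 0).
def pvAddRow (rs : List Int) (cs : List Char) : List Int :=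
  match rs, cs with
  | rs, [] => rs
  | [], c :: cs' => ((c.toNat : Int) - 33) :: pvAddRow [] cs'
  | r :: rs', c :: cs' => (r + ((c.toNat : Int) - 33)) :: pvAddRow rs' cs'

theorem pvInnerA_shift (cs : List Char) (rs : List Int) (item : Nat) (r : Int) :
    pvInnerA (r :: rs) (item + 1) cs = r :: pvInnerA rs item cs := by
  induction cs generalizing rs item r with
  | nil => rfl
  | cons c cs' ih =>
    simp only [pvInnerA, List.length_cons]
    by_cases h : item < rs.length
    · simp [h, List.set, List.getD, ih]
    · simp [h, ih]

theorem pvInnerA_eq_addRow (cs : List Char) (rs : List Int) :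
    pvInnerA rs 0 cs = pvAddRow rs cs := by
  induction cs generalizing rs with
  | nil => cases rs <;> rfl
  | cons c cs' ih =>
    cases rs with
    | nil =>
      simp only [pvInnerA, List.length_nil, Nat.lt_irrefl, if_false, List.nil_append]
      rw [show (1 : Nat) = 0 + 1 from rfl, pvInnerA_shift, ih]
      rfl
    | cons r rs' =>
      simp only [pvInnerA, List.length_cons, Nat.succ_pos, if_true, List.set, List.getD,
        List.getElem?_cons_zero, Option.getD_some]
      rw [show (1 : Nat) = 0 + 1 from rfl, pvInnerA_shift, ih]
      rfl

theorem pvAddRow_length (rs : List Int) (cs : List Char) :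
    (pvAddRow rs cs).length = max rs.length cs.length := by
  induction cs generalizing rs with
  | nil => cases rs <;> simp [pvAddRow]
  | cons c cs' ih =>
    cases rs with
    | nil => simp [pvAddRow, ih]
    | cons r rs' => simp [pvAddRow, ih]

theorem pvAddRow_getD (rs : List Int) (cs : List Char) (i : Nat) :
    (pvAddRow rs cs).getD i 0 =
      rs.getD i 0 + (if i < cs.length then ((cs.getD i ' ').toNat : Int) - 33 else 0) := by
  induction cs generalizing rs i with
  | nil => cases rs <;> simp [pvAddRow]
  | cons c cs' ih =>
    cases rs with
    | nil =>
      cases i with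
      | zero => simp [pvAddRow]
      | succ j => simpa [pvAddRow, Nat.succ_lt_succ_iff] using ih [] j
    | cons r rs' =>
      cases i with
      | zero => simp [pvAddRow]
      | succ j => simpa [pvAddRow, Nat.succ_lt_succ_iff] using ih rs' j

-- A's accumulator after the whole fold.
def pvRun (L : List String) : List Int :=
  L.foldl (fun results qual => pvInnerA results 0 qual.toList) []

def pvWidth (L : List String) : Nat := L.foldl (fun m q => max m q.toList.length) 0

def pvColSum (L : List String) (i : Nat) : Int :=
  L.foldl (fun s q =>
    if i < q.toList.length then s + ((q.toList.getD i ' ').toNat : Int) - 33 else s) 0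

theorem pvRun_length (L : List String) : (pvRun L).length = pvWidth L := by
  induction L using List.reverseRecOn with
  | nil => rfl
  | append_singleton L q ih =>
    simp only [pvRun, pvWidth, List.foldl_append, List.foldl_cons, List.foldl_nil] at *
    rw [pvInnerA_eq_addRow, pvAddRow_length, ih]

theorem pvRun_getD (L : List String) (i : Nat) :
    (pvRun L).getD i 0 = pvColSum L i := by
  induction L using List.reverseRecOn with
  | nil => simp [pvRun, pvColSum]
  | append_singleton L q ih =>
    simp only [pvRun, pvColSum, List.foldl_append, List.foldl_cons, List.foldl_nil] at *
    rw [pvInnerA_eq_addRow, pvAddRow_getD, ih]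
    split_ifs with h <;> simp <;> ring

theorem pvRun_eq_alt (L : List String) : pvRun L = calculate_quals_alt L := by
  apply List.ext_getElem
  · simp [calculate_quals_alt, pvRun_length, pvWidth]
  · intro i h1 h2
    have hi : i < pvWidth L := by
      simpa [calculate_quals_alt, pvWidth] using h2
    have := pvRun_getD L i
    rw [List.getD_eq_getElem _ _ h1] at this
    simp [calculate_quals_alt, this, pvColSum]

-- ===== VERDICT (by name: the statement is the Claim_ definition above) =====
theorem calculate_quals_spec : Claim_equal_calculate_quals := by
  intro quality _
  show calculate_quals quality = calculate_quals_alt quality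
  exact pvRun_eq_alt quality
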